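-- pv_equiv track=rewrite | github.com/tonezzz/chaba | mcp/mcp-deka/main.py | _extract_first_html
-- ===== SOURCE A (Python) =====
-- from typing import Any, Dict, List, Optional
--
-- def _extract_first_html(texts: List[str]) -> Optional[str]:
--     # capture_html with inline=true returns HTML as a text output.
--     for t in texts:
--         if isinstance(t, str) and "<html" in t.lower():
--             return t
--     # Sometimes page.content() may start with doctype.
--     for t in texts:
--         if isinstance(t, str) and "<!doctype" in t.lower():
--             return t
--     return None
-- ===== SOURCE B (Python) =====
-- from typing import List, Optional
--
-- def _extract_first_html(texts: List[str]) -> Optional[str]: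
--     # Single pass: return immediately on html; remember the first doctype as fallback.
--     first_doctype = None
--     for t in texts:
--         if not isinstance(t, str):
--             continue
--         low = t.lower()
--         if "<html" in low:
--             return t
--         if first_doctype is None and "<!doctype" in low:
--             first_doctype = t
--     return first_doctype
-- ===== Notes on version B (the rewrite author's own statement) =====
-- stated objective: alternative
-- what changed: Replaces A's two sequential scans with one pass that returns on the first html match and maintains the first doctype seen as fallback state.
import Mathlib
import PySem

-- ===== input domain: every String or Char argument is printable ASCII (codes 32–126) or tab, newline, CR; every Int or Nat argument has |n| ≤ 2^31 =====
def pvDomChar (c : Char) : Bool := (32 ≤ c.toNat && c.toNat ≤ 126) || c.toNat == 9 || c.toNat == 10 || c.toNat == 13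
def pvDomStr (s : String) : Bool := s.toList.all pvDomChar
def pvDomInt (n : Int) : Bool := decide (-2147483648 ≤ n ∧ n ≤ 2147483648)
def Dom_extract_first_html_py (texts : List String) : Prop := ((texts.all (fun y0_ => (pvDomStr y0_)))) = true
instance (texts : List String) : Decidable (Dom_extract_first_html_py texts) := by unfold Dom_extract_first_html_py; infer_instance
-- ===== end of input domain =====

-- B does the same search in one pass (immediate return on html, first doctype kept as state) instead of A's two scans; objective: alternative decomposition.

-- ===== PORT A =====
-- first loop: return the first t with "<html" in t.lower()
def pvALoop1 : List String → Option String
  | [] => none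
  | t :: rest =>
    if PySem.Str.isIn "<html" (PySem.Str.lower t) then some t else pvALoop1 rest

-- second loop: return the first t with "<!doctype" in t.lower()
def pvALoop2 : List String → Option String
  | [] => none
  | t :: rest =>
    if PySem.Str.isIn "<!doctype" (PySem.Str.lower t) then some t else pvALoop2 rest

def extract_first_html_py (texts : List String) : Option String :=
  match pvALoop1 texts with
  | some t => some t
  | none => pvALoop2 texts

-- ===== PORT B =====
-- one pass; second argument is the first_doctype accumulator
def pvBLoop : List String → Option String → Option String
  | [], firstDoctype => firstDoctype
  | t :: rest, firstDoctype =>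
    let low := PySem.Str.lower t
    if PySem.Str.isIn "<html" low then some t
    else if firstDoctype.isNone && PySem.Str.isIn "<!doctype" low then pvBLoop rest (some t)
    else pvBLoop rest firstDoctype

def extract_first_html_py_alt (texts : List String) : Option String :=
  pvBLoop texts none

-- ===== PRECONDITION & SPEC =====
def Spec_extract_first_html_py (texts : List String) (out : Option String) : Prop := out = extract_first_html_py_alt texts
instance (texts : List String) (out : Option String) : Decidable (Spec_extract_first_html_py texts out) := by unfold Spec_extract_first_html_py; infer_instance

-- ===== CLAIM (what is proved, stated in full; the proofs are below) =====
def Claim_equal_extract_first_html_py : Prop := ∀ (texts : List String), Dom_extract_first_html_py texts → Spec_extract_first_html_py texts (extract_first_html_py texts)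

-- ===== LEMMAS AND PROOFS =====
-- Loop invariant for B's single pass: the accumulator is the fallback once no html is found.
theorem pvBLoop_inv (texts : List String) (fd : Option String) :
    pvBLoop texts fd =
      match pvALoop1 texts with
      | some t => some t
      | none => match fd with
                | some f => some f
                | none => pvALoop2 texts := by
  induction texts generalizing fd with
  | nil => cases fd <;> simp [pvBLoop, pvALoop1, pvALoop2]
  | cons t rest ih =>
    by_cases hh : PySem.Chars.isIn ['<', 'h', 't', 'm', 'l'] (PySem.Chars.lower t.toList) = true
    · simp [pvBLoop, pvALoop1, hh]
    · by_cases hd : PySem.Chars.isIn ['<', '!', 'd', 'o', 'c', 't', 'y', 'p', 'e'] (PySem.Chars.lower t.toList) = true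
      · cases fd with
        | none => simp [pvBLoop, pvALoop1, pvALoop2, hh, hd, ih]
        | some f => simp [pvBLoop, pvALoop1, hh, hd, ih]
      · cases fd <;> simp [pvBLoop, pvALoop1, pvALoop2, hh, hd, ih]

-- ===== VERDICT (by name: the statement is the Claim_ definition above) =====
theorem extract_first_html_py_spec : Claim_equal_extract_first_html_py := by
  intro texts _
  unfold Spec_extract_first_html_py extract_first_html_py extract_first_html_py_alt
  rw [pvBLoop_inv]
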